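-- pv_equiv track=rewrite | github.com/Ripan-Roy/CP-DSA | TCS CODEVITA/TCS CODEVITA 2023/Round 2/temp.py | find_substrings
-- ===== SOURCE A (Python) =====
-- def build_kmp_table(pattern):
--     table = [0] * len(pattern)
--     j = 0
--
--     for i in range(1, len(pattern)):
--         while j > 0 and pattern[i] != pattern[j]:
--             j = table[j - 1]
--
--         if pattern[i] == pattern[j]:
--             j += 1
--
--         table[i] = j
--
--     return table
--
-- def is_substring_present(substring, s2):
--     pattern = substring + "#" + s2
--     table = build_kmp_table(pattern)
--
--     for i in range(len(substring) + 1, len(pattern)):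
--         if table[i] == len(substring):
--             return True
--
--     return False
--
-- def find_substrings(s1, s2):
--     substrings = []
--     remaining_s1 = s1
--
--     while remaining_s1:
--         found_substring = False
--
--         for i in range(len(remaining_s1), 0, -1):
--             current_substring = remaining_s1[:i]
--
--             if is_substring_present(current_substring, s2):
--                 substrings.append(current_substring)
--                 found_substring = True
--                 remaining_s1 = remaining_s1[i:]
--                 break
--
--         if not found_substring:
--             return ["Impossible"]
--
--     return substrings
-- ===== SOURCE B (Python) =====
-- def find_substrings(s1, s2):
--     substrings = []
--     remaining = s1
--     while remaining:
--         best = 0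
--         for j in range(len(s2)):
--             tail = s2[j:]
--             k = 0
--             while k < len(remaining) and k < len(tail) and remaining[k] == tail[k]:
--                 k += 1
--             if best < k:
--                 best = k
--         if best == 0:
--             return ["Impossible"]
--         substrings.append(remaining[:best])
--         remaining = remaining[best:]
--     return substrings
-- ===== Notes on version B (the rewrite author's own statement) =====
-- stated objective: faster
-- what changed: A tests each candidate prefix by building a fresh KMP failure table over substring+'#'+s2; B computes the longest matchable prefix of the remainder directly in one pass as the maximum common-prefix length against every suffix of s2, removing the per-candidate KMP construction entirely. Pre_ excludes inputs whose s1 contains '#' (A's sentinel), where A's presence test is unreliable.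
-- outside the precondition, e.g. on find_substrings('#', '#'): A returns ['Impossible'], B returns ['#']; on find_substrings('#a', 'a'): A returns ['#a'], B returns ['Impossible']
import Mathlib
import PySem

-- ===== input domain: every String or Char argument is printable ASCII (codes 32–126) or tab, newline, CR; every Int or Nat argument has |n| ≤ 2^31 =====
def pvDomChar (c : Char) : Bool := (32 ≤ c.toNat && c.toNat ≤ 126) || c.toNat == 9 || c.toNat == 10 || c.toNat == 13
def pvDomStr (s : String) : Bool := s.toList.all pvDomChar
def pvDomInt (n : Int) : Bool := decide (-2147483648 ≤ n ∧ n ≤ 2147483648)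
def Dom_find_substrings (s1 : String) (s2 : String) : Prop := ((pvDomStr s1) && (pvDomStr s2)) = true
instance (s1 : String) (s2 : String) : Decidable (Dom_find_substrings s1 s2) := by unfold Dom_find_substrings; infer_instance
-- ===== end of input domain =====

-- B replaces A's per-candidate KMP-with-'#'-sentinel presence test by a direct one-pass
-- max common-prefix scan over s2's suffixes (objective: faster, measured).

-- ===== PORT A =====
def kmpWhile (p : List Char) (table : List Nat) (c : Char) : Nat → Nat → Nat
  | 0, j => j
  | fuel+1, j => if 0 < j ∧ p.getD j ' ' ≠ c then kmpWhile p table c fuel (table.getD (j-1) 0) else j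

def buildKmpTable (pattern : List Char) : List Nat :=
  ((PySem.List.pyRange 1 pattern.length 1).foldl (fun st i =>
    let c := pattern.getD i.toNat ' '
    let j1 := kmpWhile pattern st.1 c st.2 st.2
    let j2 := if c = pattern.getD j1 ' ' then j1 + 1 else j1
    (st.1.set i.toNat j2, j2)) (List.replicate pattern.length 0, 0)).1

def isSubstringPresent (substring s2 : List Char) : Bool :=
  let pattern := substring ++ '#' :: s2
  let table := buildKmpTable pattern
  (PySem.List.pyRange (substring.length + 1) pattern.length 1).any
    (fun i => table.getD i.toNat 0 == substring.length)

def findIdxA (s2 r : List Char) : List Int → Option Int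
  | [] => none
  | i :: rest =>
    if isSubstringPresent (PySem.List.slice r none (some i)) s2 then some i
    else findIdxA s2 r rest

def goA : Nat → List Char → List Char → List String → List String
  | 0, _, _, acc => acc
  | fuel+1, r, s2, acc =>
    if r.isEmpty then acc
    else
      match findIdxA s2 r (PySem.List.pyRange (r.length : Int) 0 (-1)) with
      | none => ["Impossible"]
      | some i =>
          goA fuel (PySem.List.slice r (some i) none) s2
            (acc ++ [String.ofList (PySem.List.slice r none (some i))])

def find_substrings (s1 : String) (s2 : String) : List String :=
  goA (s1.toList.length + 1) s1.toList s2.toList []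

-- ===== PORT B =====
def lcp : List Char → List Char → Nat
  | a :: as, b :: bs => if a = b then lcp as bs + 1 else 0
  | _, _ => 0

def bestLen (r s2 : List Char) : Nat :=
  (PySem.List.pyRange 0 (s2.length : Int) 1).foldl (fun best j =>
    let k := lcp r (PySem.List.slice s2 (some j) none)
    if best < k then k else best) 0

def goB : Nat → List Char → List Char → List String → List String
  | 0, _, _, acc => acc
  | fuel+1, r, s2, acc =>
    if r.isEmpty then acc
    else
      let best := bestLen r s2
      if best = 0 then ["Impossible"]
      else goB fuel (r.drop best) s2 (acc ++ [String.ofList (r.take best)])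

def find_substrings_alt (s1 : String) (s2 : String) : List String :=
  goB (s1.toList.length + 1) s1.toList s2.toList []

-- ===== PRECONDITION & SPEC =====
-- Pre_ excludes inputs whose s1 contains '#': A uses '#' as its KMP sentinel, and when a
-- candidate prefix of s1 contains the sentinel A's presence test is unreliable (it can both
-- miss a present prefix and report an absent one), so A's value there is an artefact of the
-- sentinel choice ('#' in s2 alone is harmless and stays inside Pre_).
def Pre_find_substrings (s1 : String) (s2 : String) : Prop :=
  '#' ∉ s1.toList
instance (s1 : String) (s2 : String) : Decidable (Pre_find_substrings s1 s2) := by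
  unfold Pre_find_substrings; infer_instance

def pvWitness_find_substrings : String × String := ("aba", "a#b")

def Spec_find_substrings (s1 : String) (s2 : String) (out : List String) : Prop :=
  out = find_substrings_alt s1 s2
instance (s1 : String) (s2 : String) (out : List String) :
    Decidable (Spec_find_substrings s1 s2 out) := by unfold Spec_find_substrings; infer_instance

-- ===== CLAIM (what is proved, stated in full; the proofs are below) =====
def Claim_equal_find_substrings : Prop :=
  ∀ (s1 : String) (s2 : String), Dom_find_substrings s1 s2 →
    Pre_find_substrings s1 s2 → Spec_find_substrings s1 s2 (find_substrings s1 s2)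

-- ===== LEMMAS AND PROOFS =====

abbrev IsBorder (w : List Char) (b : Nat) : Prop :=
  b < w.length ∧ ∀ t, t < b → w.getD t ' ' = w.getD (w.length - b + t) ' '

lemma getD_take {w : List Char} {b t : Nat} (ht : t < b) (hb : b ≤ w.length) :
    (w.take b).getD t ' ' = w.getD t ' ' := by
  have h1 : t < w.length := lt_of_lt_of_le ht hb
  have h2 : t < (w.take b).length := by simp [List.length_take]; omega
  rw [List.getD_eq_getElem _ _ h2, List.getD_eq_getElem _ _ h1, List.getElem_take]

lemma getD_mem {xs : List Char} {t : Nat} (h : t < xs.length) : xs.getD t ' ' ∈ xs := by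
  rw [List.getD_eq_getElem _ _ h]; exact List.getElem_mem h

lemma eq_of_getD {xs ys : List Char} (hl : xs.length = ys.length)
    (h : ∀ t, t < xs.length → xs.getD t ' ' = ys.getD t ' ') : xs = ys := by
  apply List.ext_getElem hl
  intro i h1 h2
  have := h i h1
  rwa [List.getD_eq_getElem _ _ h1, List.getD_eq_getElem _ _ h2] at this

lemma getD_snoc_lt {l : List Char} {c : Char} {i : Nat} (h : i < l.length) :
    (l ++ [c]).getD i ' ' = l.getD i ' ' := by
  have h2 : i < (l ++ [c]).length := by simp; omega
  rw [List.getD_eq_getElem _ _ h2, List.getD_eq_getElem _ _ h, List.getElem_append_left h]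

lemma getD_snoc_len {l : List Char} {c : Char} : (l ++ [c]).getD l.length ' ' = c := by
  have h2 : l.length < (l ++ [c]).length := by simp
  rw [List.getD_eq_getElem _ _ h2]
  simp

lemma isBorder_snoc {w : List Char} {c : Char} {b : Nat} :
    IsBorder (w ++ [c]) (b + 1) ↔ IsBorder w b ∧ w.getD b ' ' = c := by
  unfold IsBorder
  simp only [List.length_append, List.length_singleton]
  constructor
  · rintro ⟨hlen, hpt⟩
    have hb : b < w.length := by omega
    refine ⟨⟨hb, fun t ht => ?_⟩, ?_⟩
    · have := hpt t (by omega)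
      rwa [getD_snoc_lt (by omega), getD_snoc_lt (by omega),
        show w.length + 1 - (b + 1) + t = w.length - b + t by omega] at this
    · have := hpt b (by omega)
      rwa [getD_snoc_lt hb, show w.length + 1 - (b + 1) + b = w.length by omega,
        getD_snoc_len] at this
  · rintro ⟨⟨hb, hpt⟩, hc⟩
    refine ⟨by omega, fun t ht => ?_⟩
    rcases Nat.lt_or_ge t b with h | h
    · rw [getD_snoc_lt (by omega), getD_snoc_lt (by omega),
        show w.length + 1 - (b + 1) + t = w.length - b + t by omega]
      exact hpt t h
    · have ht' : t = b := by omega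
      rw [ht', getD_snoc_lt hb, show w.length + 1 - (b + 1) + b = w.length by omega,
        getD_snoc_len, hc]

lemma isBorder_take {w : List Char} {b b' : Nat} (hb : IsBorder w b) (hb' : IsBorder w b')
    (hlt : b' < b) : IsBorder (w.take b) b' := by
  obtain ⟨hbl, hbp⟩ := hb
  obtain ⟨hbl', hbp'⟩ := hb'
  refine ⟨by simp [List.length_take]; omega, fun t ht => ?_⟩
  have hlt' : (w.take b).length = b := by simp [List.length_take]; omega
  rw [hlt', getD_take (by omega) (by omega), getD_take (by omega) (by omega)]
  have h1 := hbp' t ht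
  have h2 := hbp (b - b' + t) (by omega)
  rw [show w.length - b + (b - b' + t) = w.length - b' + t by omega] at h2
  rw [h1, ← h2]

lemma isBorder_trans {w : List Char} {b b' : Nat} (hb : IsBorder w b)
    (hb' : IsBorder (w.take b) b') : IsBorder w b' := by
  obtain ⟨hbl, hbp⟩ := hb
  obtain ⟨hbl', hbp'⟩ := hb'
  have htk : (w.take b).length = b := by simp [List.length_take]; omega
  rw [htk] at hbl' hbp'
  refine ⟨by omega, fun t ht => ?_⟩
  have h1 := hbp' t ht
  rw [getD_take (by omega) (by omega), getD_take (by omega) (by omega)] at h1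
  have h2 := hbp (b - b' + t) (by omega)
  rw [show w.length - b + (b - b' + t) = w.length - b' + t by omega] at h2
  rw [h1, ← h2]

lemma take_succ_eq {p : List Char} {i : Nat} (h : i < p.length) :
    p.take (i + 1) = p.take i ++ [p.getD i ' '] := by
  rw [List.getD_eq_getElem _ _ h]
  rw [List.take_add_one]
  simp [List.getElem?_eq_getElem h]

def lb (w : List Char) : Nat := Nat.findGreatest (fun b => IsBorder w b) (w.length - 1)

lemma isBorder_zero {w : List Char} (h : w ≠ []) : IsBorder w 0 := by
  refine ⟨?_, fun t ht => by omega⟩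
  cases w <;> simp_all

lemma lb_isBorder {w : List Char} (h : w ≠ []) : IsBorder w (lb w) :=
  Nat.findGreatest_spec (Nat.zero_le _) (isBorder_zero h)

lemma lb_max {w : List Char} {b : Nat} (hb : IsBorder w b) : b ≤ lb w :=
  Nat.le_findGreatest (by have := hb.1; omega) hb

lemma lb_lt {w : List Char} (h : w ≠ []) : lb w < w.length :=
  (lb_isBorder h).1

lemma lb_single {w : List Char} (h : w.length = 1) : lb w = 0 := by
  unfold lb
  rw [show w.length - 1 = 0 by omega]
  exact Nat.findGreatest_zero

lemma take_ne_nil {p : List Char} {i : Nat} (h1 : 1 ≤ i) (h2 : i ≤ p.length) :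
    p.take i ≠ [] := by
  have : (p.take i).length = i := by simp [List.length_take]; omega
  intro hc; rw [hc] at this; simp at this; omega

lemma length_take_eq {p : List Char} {i : Nat} (h : i ≤ p.length) :
    (p.take i).length = i := by simp [List.length_take]; omega

lemma kmpWhile_spec (p : List Char) (table : List Nat) (i : Nat) (hi : 1 ≤ i)
    (hilen : i < p.length)
    (Htab : ∀ k, k < i → table.getD k 0 = lb (p.take (k+1))) :
    ∀ fuel j, j ≤ fuel → IsBorder (p.take i) j →
      IsBorder (p.take i) (kmpWhile p table (p.getD i ' ') fuel j) ∧
      (kmpWhile p table (p.getD i ' ') fuel j = 0 ∨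
        p.getD (kmpWhile p table (p.getD i ' ') fuel j) ' ' = p.getD i ' ') ∧
      (∀ b, IsBorder (p.take i) b → p.getD b ' ' = p.getD i ' ' → b ≤ j →
        b ≤ kmpWhile p table (p.getD i ' ') fuel j) := by
  intro fuel
  induction fuel with
  | zero =>
    intro j hj hb
    have hj0 : j = 0 := by omega
    subst hj0
    exact ⟨hb, Or.inl rfl, fun b _ _ hble => by omega⟩
  | succ f ih =>
    intro j hj hb
    by_cases hcond : 0 < j ∧ p.getD j ' ' ≠ p.getD i ' '
    · have hstep : kmpWhile p table (p.getD i ' ') (f+1) j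
          = kmpWhile p table (p.getD i ' ') f (table.getD (j-1) 0) := by
        simp only [kmpWhile, if_pos hcond]
      have hjlt : j < i := by
        have := hb.1
        rwa [length_take_eq (by omega)] at this
      have htj : table.getD (j-1) 0 = lb (p.take j) := by
        have := Htab (j-1) (by omega)
        rwa [show j - 1 + 1 = j by omega] at this
      have htt : p.take j = (p.take i).take j := by
        rw [List.take_take]
        congr 1
        omega
      have hjne : p.take j ≠ [] := take_ne_nil (by omega) (by omega)
      have hlbj : IsBorder (p.take j) (lb (p.take j)) := lb_isBorder hjne
      have hjb : IsBorder (p.take i) j := hb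
      have hj'b : IsBorder (p.take i) (lb (p.take j)) := by
        apply isBorder_trans hjb
        rwa [← htt]
      have hj'lt : lb (p.take j) < j := by
        have := lb_lt hjne
        rwa [length_take_eq (by omega)] at this
      rw [hstep, htj]
      obtain ⟨r1, r2, r3⟩ := ih (lb (p.take j)) (by omega) hj'b
      refine ⟨r1, r2, fun b hbb hbc hble => ?_⟩
      have hbne : b ≠ j := by
        intro hcontra
        rw [hcontra] at hbc
        exact hcond.2 hbc
      have hblt : b < j := by omega
      have : IsBorder (p.take j) b := by
        rw [htt]
        exact isBorder_take hjb hbb hblt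
      exact r3 b hbb hbc (le_trans (lb_max this) (le_refl _))
    · have hstep : kmpWhile p table (p.getD i ' ') (f+1) j = j := by
        simp only [kmpWhile, if_neg hcond]
      rw [hstep]
      push Not at hcond
      refine ⟨hb, ?_, fun b _ _ hble => hble⟩
      by_cases hj0 : j = 0
      · exact Or.inl hj0
      · exact Or.inr (hcond (by omega))

lemma getD_replicate0 (n k : Nat) : (List.replicate n (0:Nat)).getD k 0 = 0 := by
  simp [List.getD_eq_getElem?_getD]

lemma getD_set_ne' (l : List Nat) (i k v : Nat) (h : i ≠ k) :
    (l.set i v).getD k 0 = l.getD k 0 := by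
  simp [List.getD_eq_getElem?_getD, List.getElem?_set_ne h]

lemma getD_set_self' (l : List Nat) (i v : Nat) (h : i < l.length) :
    (l.set i v).getD i 0 = v := by
  simp [List.getD_eq_getElem?_getD, h]

lemma kmp_step (p : List Char) (table : List Nat) (i : Nat) (hi : 1 ≤ i)
    (hilen : i < p.length)
    (Htab : ∀ k, k < i → table.getD k 0 = lb (p.take (k+1))) :
    (if p.getD i ' ' = p.getD (kmpWhile p table (p.getD i ' ') (lb (p.take i)) (lb (p.take i))) ' '
     then kmpWhile p table (p.getD i ' ') (lb (p.take i)) (lb (p.take i)) + 1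
     else kmpWhile p table (p.getD i ' ') (lb (p.take i)) (lb (p.take i)))
      = lb (p.take (i+1)) := by
  have hwne : p.take i ≠ [] := take_ne_nil hi (by omega)
  have hlen : (p.take i).length = i := length_take_eq (by omega)
  obtain ⟨r1, r2, r3⟩ := kmpWhile_spec p table i hi hilen Htab (lb (p.take i))
    (lb (p.take i)) le_rfl (lb_isBorder hwne)
  set c := p.getD i ' ' with hc
  set r := kmpWhile p table c (lb (p.take i)) (lb (p.take i)) with hr
  have hsucc : p.take (i+1) = p.take i ++ [c] := take_succ_eq hilen
  have hrlt : r < i := by have := r1.1; omega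
  have hne1 : p.take (i+1) ≠ [] := take_ne_nil (by omega) (by omega)
  have hub : ∀ b', IsBorder (p.take (i+1)) b' → b' ≤ (if c = p.getD r ' ' then r + 1 else r) := by
    intro b' hb'
    cases b' with
    | zero => omega
    | succ b =>
      rw [hsucc, isBorder_snoc] at hb'
      obtain ⟨hbw, hbc⟩ := hb'
      have hblt : b < i := by have := hbw.1; omega
      have hpc : p.getD b ' ' = c := by rw [← getD_take hblt (le_of_lt hilen)]; exact hbc
      have hble : b ≤ r := r3 b hbw hpc (lb_max hbw)
      split_ifs with hcr
      · omega
      · exfalso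
        have hr0 : r = 0 := by
          rcases r2 with h0 | hgc
          · exact h0
          · exact absurd hgc.symm hcr
        have hb0 : b = 0 := by omega
        rw [hr0] at hcr
        rw [hb0] at hpc
        exact hcr hpc.symm
  have hlbb : IsBorder (p.take (i+1)) (if c = p.getD r ' ' then r + 1 else r) := by
    split_ifs with hcr
    · rw [hsucc, isBorder_snoc]
      refine ⟨r1, ?_⟩
      rw [getD_take hrlt (le_of_lt hilen)]
      exact hcr.symm
    · have hr0 : r = 0 := by
        rcases r2 with h0 | hgc
        · exact h0
        · exact absurd hgc.symm hcr
      rw [hr0]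
      exact isBorder_zero hne1
  exact le_antisymm (lb_max hlbb) (hub _ (lb_isBorder hne1))

def kmpFold (p : List Char) (m : Nat) : List Nat × Nat :=
  (PySem.List.pyRange 1 (m : Int) 1).foldl (fun st i =>
    let c := p.getD i.toNat ' '
    let j1 := kmpWhile p st.1 c st.2 st.2
    let j2 := if c = p.getD j1 ' ' then j1 + 1 else j1
    (st.1.set i.toNat j2, j2)) (List.replicate p.length 0, 0)

lemma buildKmpTable_eq (p : List Char) : buildKmpTable p = (kmpFold p p.length).1 := rfl

lemma kmpFold_succ (p : List Char) (m : Nat) (hm : 1 ≤ m) :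
    kmpFold p (m+1) =
      ((kmpFold p m).1.set m
        (if p.getD m ' ' = p.getD (kmpWhile p (kmpFold p m).1 (p.getD m ' ') (kmpFold p m).2 (kmpFold p m).2) ' '
         then kmpWhile p (kmpFold p m).1 (p.getD m ' ') (kmpFold p m).2 (kmpFold p m).2 + 1
         else kmpWhile p (kmpFold p m).1 (p.getD m ' ') (kmpFold p m).2 (kmpFold p m).2),
       if p.getD m ' ' = p.getD (kmpWhile p (kmpFold p m).1 (p.getD m ' ') (kmpFold p m).2 (kmpFold p m).2) ' '
         then kmpWhile p (kmpFold p m).1 (p.getD m ' ') (kmpFold p m).2 (kmpFold p m).2 + 1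
         else kmpWhile p (kmpFold p m).1 (p.getD m ' ') (kmpFold p m).2 (kmpFold p m).2) := by
  unfold kmpFold
  rw [show ((m+1 : Nat) : Int) = ((m:Nat):Int) + 1 by push_cast; ring]
  rw [PySem.List.pyRange_one_succ_right (by exact_mod_cast hm)]
  rw [List.foldl_append]
  simp only [List.foldl_cons, List.foldl_nil, Int.toNat_natCast]

lemma kmpFold_inv (p : List Char) :
    ∀ m, 1 ≤ m → m ≤ p.length →
      (kmpFold p m).1.length = p.length ∧
      (kmpFold p m).2 = lb (p.take m) ∧
      (∀ k, k < m → (kmpFold p m).1.getD k 0 = lb (p.take (k+1))) ∧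
      (∀ k, m ≤ k → (kmpFold p m).1.getD k 0 = 0) := by
  intro m
  induction m with
  | zero => intro h1 _; exact absurd h1 (by omega)
  | succ m ih =>
    intro _ h2
    by_cases hm : m = 0
    · subst hm
      have hr : PySem.List.pyRange 1 (((0+1 : Nat)) : Int) 1 = [] := by
        norm_num [PySem.List.pyRange_one_eq_nil]
      unfold kmpFold
      rw [hr]
      simp only [List.foldl_nil]
      have hlb1 : lb (p.take 1) = 0 := lb_single (length_take_eq (by omega))
      refine ⟨by simp, by simpa using hlb1.symm, ?_, fun k _ => getD_replicate0 _ _⟩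
      intro k hk
      have hk0 : k = 0 := by omega
      subst hk0
      rw [getD_replicate0]
      exact hlb1.symm
    · have hm1 : 1 ≤ m := by omega
      obtain ⟨ih1, ih2, ih3, ih4⟩ := ih hm1 (by omega)
      have hv := kmp_step p (kmpFold p m).1 m hm1 (by omega) ih3
      rw [← ih2] at hv
      rw [kmpFold_succ p m hm1]
      refine ⟨by simp [List.length_set, ih1], by simpa using hv, ?_, ?_⟩
      · intro k hk
        rcases Nat.lt_or_ge k m with h | h
        · rw [getD_set_ne' _ _ _ _ (by omega)]
          exact ih3 k h
        · have hkm : k = m := by omega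
          subst hkm
          rw [getD_set_self' _ _ _ (by omega)]
          exact hv
      · intro k hk
        rw [getD_set_ne' _ _ _ _ (by omega)]
        exact ih4 k (by omega)

lemma buildKmpTable_spec (p : List Char) :
    ∀ k, k < p.length → (buildKmpTable p).getD k 0 = lb (p.take (k+1)) := by
  intro k hk
  obtain ⟨_, _, h3, _⟩ := kmpFold_inv p p.length (by omega) le_rfl
  rw [buildKmpTable_eq]
  exact h3 k hk

lemma getD_append_lt {l1 l2 : List Char} {t : Nat} (h : t < l1.length) :
    (l1 ++ l2).getD t ' ' = l1.getD t ' ' := by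
  rw [List.getD_eq_getElem _ _ (by simp; omega), List.getD_eq_getElem _ _ h,
    List.getElem_append_left h]

lemma getD_sentinel (sub s2 : List Char) : (sub ++ '#' :: s2).getD sub.length ' ' = '#' := by
  rw [List.getD_eq_getElem _ _ (by simp)]
  simp

lemma getD_drop' {s2 : List Char} {j t : Nat} (h : j + t < s2.length) :
    (s2.drop j).getD t ' ' = s2.getD (j+t) ' ' := by
  rw [List.getD_eq_getElem _ _ (by simp; omega), List.getD_eq_getElem _ _ h]
  simp [List.getElem_drop]

lemma getD_right {sub s2 : List Char} {t : Nat} (h : t < s2.length) :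
    (sub ++ '#' :: s2).getD (sub.length + 1 + t) ' ' = s2.getD t ' ' := by
  rw [List.getD_eq_getElem _ _ (by simp; omega), List.getD_eq_getElem _ _ h]
  rw [List.getElem_append_right (by omega)]
  simp [show sub.length + 1 + t - sub.length = t + 1 by omega]

lemma lb_eq_iff_exists (sub s2 : List Char) (hne : sub ≠ [])
    (hsub : '#' ∉ sub) :
    (∃ k : Nat, sub.length + 1 ≤ k ∧ k < (sub ++ '#' :: s2).length ∧
        lb ((sub ++ '#' :: s2).take (k+1)) = sub.length) ↔
      (∃ j : Nat, j + sub.length ≤ s2.length ∧ (s2.drop j).take sub.length = sub) := by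
  set p := sub ++ '#' :: s2 with hp
  set m := sub.length with hm
  have hm1 : 1 ≤ m := by
    cases sub
    · exact absurd rfl hne
    · simp [hm]
  have hn : p.length = m + 1 + s2.length := by simp [hp, hm]; omega
  have hsubD : ∀ t, t < m → sub.getD t ' ' ≠ '#' := fun t ht h => hsub (h ▸ getD_mem ht)
  constructor
  · rintro ⟨k, hk1, hk2, hlb⟩
    have hkn : k + 1 ≤ p.length := by omega
    have hWne : p.take (k+1) ≠ [] := take_ne_nil (by omega) hkn
    have hWlen : (p.take (k+1)).length = k + 1 := length_take_eq hkn
    have hbd : IsBorder (p.take (k+1)) m := hlb ▸ lb_isBorder hWne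
    have hppt : ∀ t, t < m → p.getD t ' ' = p.getD (k+1-m+t) ' ' := by
      intro t ht
      have := hbd.2 t ht
      rw [hWlen] at this
      rwa [getD_take (by omega) hkn, getD_take (by omega) hkn] at this
    have hstart : m + 1 ≤ k + 1 - m := by
      by_contra hcon
      have h2 : k + 1 - m ≤ m := by omega
      have h1 : 1 ≤ k + 1 - m := by omega
      have ht : m - (k+1-m) < m := by omega
      have := hppt (m - (k+1-m)) ht
      rw [show k+1-m + (m - (k+1-m)) = m by omega, getD_sentinel] at this
      rw [getD_append_lt (by omega)] at this
      exact hsubD _ ht this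
    set j := k + 1 - m - (m+1) with hj
    refine ⟨j, by omega, ?_⟩
    apply eq_of_getD
    · rw [← hm]
      simp [List.length_take, List.length_drop]
      omega
    · intro t ht
      rw [List.length_take, List.length_drop] at ht
      have htm : t < m := by omega
      rw [getD_take htm (by simp [List.length_drop]; omega), getD_drop' (by omega)]
      have := hppt t htm
      rw [getD_append_lt (by omega)] at this
      rw [show k+1-m+t = m+1+(j+t) by omega] at this
      rw [show p.getD (m+1+(j+t)) ' ' = s2.getD (j+t) ' ' from
        by exact getD_right (by omega)] at this
      exact this.symm
  · intro hex
    have hfind := Nat.find_spec hex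
    set j := Nat.find hex with hjdef
    obtain ⟨hjm, hocc⟩ := hfind
    have hop : ∀ t, t < m → s2.getD (j+t) ' ' = sub.getD t ' ' := by
      intro t ht
      have := congrArg (fun l => l.getD t ' ') hocc
      simp only at this
      rw [getD_take ht (by simp [List.length_drop]; omega), getD_drop' (by omega)] at this
      exact this
    refine ⟨m + j + m, by omega, by omega, ?_⟩
    set k := m + j + m with hk
    have hkn : k + 1 ≤ p.length := by omega
    have hWne : p.take (k+1) ≠ [] := take_ne_nil (by omega) hkn
    have hWlen : (p.take (k+1)).length = k + 1 := length_take_eq hkn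
    have hbd : IsBorder (p.take (k+1)) m := by
      refine ⟨by omega, ?_⟩
      intro t ht
      rw [hWlen, getD_take (by omega) hkn, getD_take (by omega) hkn]
      rw [getD_append_lt (by omega)]
      rw [show k+1-m+t = m+1+(j+t) by omega]
      rw [show p.getD (m+1+(j+t)) ' ' = s2.getD (j+t) ' ' from
        by exact getD_right (by omega)]
      exact (hop t ht).symm
    have hub : ∀ L, IsBorder (p.take (k+1)) L → L ≤ m := by
      intro L hL
      by_contra hcon
      have hLm : m + 1 ≤ L := by omega
      have hLk : L ≤ k := by have := hL.1; omega
      -- the length-L border begins with sub, yielding an occurrence of sub ending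
      -- earlier than the minimal one — contradiction
      have hppt : ∀ t, t < m → sub.getD t ' ' = p.getD (k+1-L+t) ' ' := by
        intro t ht
        have := hL.2 t (by omega)
        rw [hWlen, getD_take (by omega) hkn, getD_take (by omega) hkn] at this
        rwa [getD_append_lt (by omega)] at this
      have hstart : m + 1 ≤ k + 1 - L := by
        by_contra hcon2
        have h1 : 1 ≤ k + 1 - L := by omega
        have ht : m - (k+1-L) < m := by omega
        have := hppt (m - (k+1-L)) ht
        rw [show k+1-L + (m - (k+1-L)) = m by omega, getD_sentinel] at this
        exact hsubD _ ht this
      set j' := k + 1 - L - (m+1) with hj'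
      have hj'lt : j' < j := by omega
      have hP : j' + m ≤ s2.length ∧ (s2.drop j').take m = sub := by
        refine ⟨by omega, ?_⟩
        apply eq_of_getD
        · rw [← hm]
          simp [List.length_take, List.length_drop]
          omega
        · intro t ht
          rw [List.length_take, List.length_drop] at ht
          have htm : t < m := by omega
          rw [getD_take htm (by simp [List.length_drop]; omega), getD_drop' (by omega)]
          have := hppt t htm
          rw [show k+1-L+t = m+1+(j'+t) by omega] at this
          rw [show p.getD (m+1+(j'+t)) ' ' = s2.getD (j'+t) ' ' from
            by exact getD_right (by omega)] at this
          exact this.symm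
      exact Nat.find_min hex hj'lt hP
    exact le_antisymm (hub _ (lb_isBorder hWne)) (lb_max hbd)

lemma present_iff (sub s2 : List Char) (hne : sub ≠ [])
    (hsub : '#' ∉ sub) :
    isSubstringPresent sub s2 = true ↔
      ∃ j : Nat, j + sub.length ≤ s2.length ∧ (s2.drop j).take sub.length = sub := by
  rw [← lb_eq_iff_exists sub s2 hne hsub]
  unfold isSubstringPresent
  simp only [List.any_eq_true, PySem.List.mem_pyRange_one, beq_iff_eq]
  constructor
  · rintro ⟨i, ⟨hi1, hi2⟩, hpred⟩
    have hi0 : 0 ≤ i := by omega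
    refine ⟨i.toNat, by omega, by
      have : (i.toNat : Int) = i := Int.toNat_of_nonneg hi0
      omega, ?_⟩
    rw [← buildKmpTable_spec _ i.toNat (by omega)]
    exact hpred
  · rintro ⟨k, hk1, hk2, hlb⟩
    refine ⟨(k : Int), ⟨by exact_mod_cast hk1, by exact_mod_cast hk2⟩, ?_⟩
    rw [Int.toNat_natCast, buildKmpTable_spec _ k (by omega)]
    exact hlb

lemma le_lcp_iff : ∀ (a b : List Char) (k : Nat),
    k ≤ lcp a b ↔ k ≤ a.length ∧ k ≤ b.length ∧ a.take k = b.take k := by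
  intro a
  induction a with
  | nil => intro b k; cases b <;> cases k <;> simp [lcp]
  | cons x as ih =>
    intro b k
    cases b with
    | nil => cases k <;> simp [lcp]
    | cons y bs =>
      cases k with
      | zero => simp
      | succ k =>
        by_cases h : x = y
        · subst h
          have hred : lcp (x :: as) (x :: bs) = lcp as bs + 1 := by simp [lcp]
          rw [hred]
          simp only [List.take_succ_cons, List.length_cons]
          rw [show (k+1 ≤ lcp as bs + 1) ↔ k ≤ lcp as bs by omega, ih]
          constructor
          · rintro ⟨h1, h2, h3⟩
            exact ⟨by omega, by omega, by rw [h3]⟩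
          · rintro ⟨h1, h2, h3⟩
            injection h3 with _ h4
            exact ⟨by omega, by omega, h4⟩
        · simp only [lcp, if_neg h, List.take_succ_cons]
          constructor
          · intro hh
            exact absurd hh (by omega)
          · rintro ⟨h1, h2, h3⟩
            injection h3 with h4 _
            exact absurd h4 h

lemma lcp_le_left (a b : List Char) : lcp a b ≤ a.length :=
  ((le_lcp_iff a b (lcp a b)).1 le_rfl).1

lemma foldl_maxstep_le {l : List Int} {f : Int → Nat} {init B : Nat} (h0 : init ≤ B)
    (h : ∀ x ∈ l, f x ≤ B) :
    l.foldl (fun acc x => if acc < f x then f x else acc) init ≤ B := by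
  induction l generalizing init with
  | nil => exact h0
  | cons y t ih =>
    simp only [List.foldl_cons]
    apply ih
    · split
      · exact h y List.mem_cons_self
      · exact h0
    · exact fun x hx => h x (List.mem_cons_of_mem _ hx)

lemma foldl_maxstep_ge {l : List Int} {f : Int → Nat} {init : Nat} :
    init ≤ l.foldl (fun acc x => if acc < f x then f x else acc) init ∧
    ∀ x ∈ l, f x ≤ l.foldl (fun acc x => if acc < f x then f x else acc) init := by
  induction l generalizing init with
  | nil => exact ⟨le_rfl, by simp⟩
  | cons y t ih =>
    simp only [List.foldl_cons]
    obtain ⟨ih1, ih2⟩ := ih (init := if init < f y then f y else init)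
    constructor
    · exact le_trans (by split <;> omega) ih1
    · intro x hx
      rcases List.mem_cons.1 hx with rfl | hx'
      · exact le_trans (by split <;> omega) ih1
      · exact ih2 x hx'

lemma foldl_maxstep_mem {l : List Int} {f : Int → Nat} {init : Nat} :
    l.foldl (fun acc x => if acc < f x then f x else acc) init = init ∨
    ∃ x ∈ l, l.foldl (fun acc x => if acc < f x then f x else acc) init = f x := by
  induction l generalizing init with
  | nil => exact Or.inl rfl
  | cons y t ih =>
    simp only [List.foldl_cons]
    rcases ih (init := if init < f y then f y else init) with h | ⟨x, hx, h⟩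
    · rw [h]
      split
      · exact Or.inr ⟨y, List.mem_cons_self, rfl⟩
      · exact Or.inl rfl
    · exact Or.inr ⟨x, List.mem_cons_of_mem _ hx, h⟩

lemma bestLen_eq (r s2 : List Char) :
    bestLen r s2 = (PySem.List.pyRange 0 (s2.length : Int) 1).foldl
      (fun acc j => if acc < lcp r (PySem.List.slice s2 (some j) none)
        then lcp r (PySem.List.slice s2 (some j) none) else acc) 0 := rfl

lemma bestLen_le (r s2 : List Char) : bestLen r s2 ≤ r.length := by
  rw [bestLen_eq]
  exact foldl_maxstep_le (by omega) (fun x _ => lcp_le_left _ _)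

lemma le_bestLen_iff (r s2 : List Char) (i : Nat) (hi : 1 ≤ i) (hir : i ≤ r.length) :
    i ≤ bestLen r s2 ↔
      ∃ j : Nat, j + i ≤ s2.length ∧ (s2.drop j).take i = r.take i := by
  rw [bestLen_eq]
  constructor
  · intro h
    rcases foldl_maxstep_mem (l := PySem.List.pyRange 0 (s2.length : Int) 1)
        (f := fun j => lcp r (PySem.List.slice s2 (some j) none)) (init := 0) with h0 | ⟨x, hx, hf⟩
    · rw [h0] at h; omega
    · rw [hf] at h
      have hx' := (PySem.List.mem_pyRange_one).1 hx
      have hx0 : 0 ≤ x := hx'.1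
      rw [PySem.List.slice_from _ hx0] at h
      obtain ⟨h1, h2, h3⟩ := (le_lcp_iff _ _ _).1 h
      rw [List.length_drop] at h2
      exact ⟨x.toNat, by omega, h3.symm⟩
  · rintro ⟨j, hj, hocc⟩
    have hjmem : (j : Int) ∈ PySem.List.pyRange 0 (s2.length : Int) 1 := by
      rw [PySem.List.mem_pyRange_one]
      constructor
      · omega
      · exact_mod_cast (by omega : j < s2.length)
    have hle : i ≤ lcp r (PySem.List.slice s2 (some (j : Int)) none) := by
      rw [PySem.List.slice_from _ (by omega), Int.toNat_natCast]
      rw [le_lcp_iff]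
      exact ⟨hir, by rw [List.length_drop]; omega, hocc.symm⟩
    exact le_trans hle ((foldl_maxstep_ge (l := PySem.List.pyRange 0 (s2.length : Int) 1) (f := fun j => lcp r (PySem.List.slice s2 (some j) none)) (init := 0)).2 _ hjmem)

lemma presentPrefix_iff (r s2 : List Char) (hr : '#' ∉ r)
    (i : Int) (h1 : 1 ≤ i) (h2 : i ≤ (r.length : Int)) :
    (isSubstringPresent (PySem.List.slice r none (some i)) s2 = true) ↔
      i.toNat ≤ bestLen r s2 := by
  have h0 : 0 ≤ i := by omega
  have hin : i.toNat ≤ r.length := by omega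
  have hin1 : 1 ≤ i.toNat := by omega
  rw [PySem.List.slice_to _ h0]
  have hlen : (r.take i.toNat).length = i.toNat := length_take_eq hin
  rw [present_iff _ _ (take_ne_nil hin1 hin) (fun h => hr (List.take_subset _ _ h))]
  rw [hlen, le_bestLen_iff r s2 i.toNat hin1 hin]

lemma findIdxA_desc (r s2 : List Char) (hsub : '#' ∉ r) :
    ∀ L : Nat, bestLen r s2 ≤ L → L ≤ r.length →
      findIdxA s2 r (PySem.List.pyRange (L : Int) 0 (-1)) =
        if bestLen r s2 = 0 then none else some ((bestLen r s2 : Nat) : Int) := by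
  intro L
  induction L with
  | zero =>
    intro hb _
    rw [show ((0:Nat) : Int) = 0 by norm_num, PySem.List.pyRange_neg_one_eq_nil le_rfl]
    simp [findIdxA, show bestLen r s2 = 0 by omega]
  | succ L ih =>
    intro hb hL
    rw [show ((L+1 : Nat) : Int) = (L : Int) + 1 by push_cast; ring]
    rw [PySem.List.pyRange_neg_one_cons (by omega)]
    rw [show ((L:Int) + 1 - 1) = ((L:Nat) : Int) by ring]
    simp only [findIdxA]
    have hpred := presentPrefix_iff r s2 hsub ((L:Int)+1) (by omega) (by exact_mod_cast hL)
    have htn : ((L:Int)+1).toNat = L + 1 := by omega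
    rw [htn] at hpred
    by_cases hcase : bestLen r s2 = L + 1
    · rw [if_pos (hpred.2 (by omega))]
      rw [if_neg (by omega), hcase]
      norm_num
    · rw [if_neg (by rw [hpred]; omega)]
      exact ih (by omega) (by omega)

lemma go_eq (s2 : List Char) :
    ∀ n r acc fuelA fuelB, r.length ≤ n → '#' ∉ r →
      r.length < fuelA → r.length < fuelB →
      goA fuelA r s2 acc = goB fuelB r s2 acc := by
  intro n
  induction n with
  | zero =>
    intro r acc fA fB hn h3 hA hB
    have hr : r = [] := by
      cases r
      · rfl
      · simp at hn
    subst hr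
    obtain ⟨fA', rfl⟩ : ∃ f, fA = f + 1 := ⟨fA - 1, by omega⟩
    obtain ⟨fB', rfl⟩ : ∃ f, fB = f + 1 := ⟨fB - 1, by omega⟩
    simp [goA, goB]
  | succ n ih =>
    intro r acc fA fB hn h3 hA hB
    obtain ⟨fA', rfl⟩ : ∃ f, fA = f + 1 := ⟨fA - 1, by omega⟩
    obtain ⟨fB', rfl⟩ : ∃ f, fB = f + 1 := ⟨fB - 1, by omega⟩
    by_cases hre : r = []
    · subst hre
      simp [goA, goB]
    · have hie : r.isEmpty = false := by simp [hre]
      have hrl : 1 ≤ r.length := by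
        cases r
        · exact absurd rfl hre
        · simp
      simp only [goA, goB, hie, Bool.false_eq_true, if_false]
      rw [findIdxA_desc r s2 h3 r.length (bestLen_le r s2) le_rfl]
      by_cases hb0 : bestLen r s2 = 0
      · rw [if_pos hb0]
        simp [hb0]
      · rw [if_neg hb0]
        simp only [if_neg hb0]
        rw [PySem.List.slice_from_natCast, PySem.List.slice_to_natCast]
        have hble := bestLen_le r s2
        apply ih
        · rw [List.length_drop]; omega
        · exact fun h => h3 (List.drop_subset _ _ h)
        · rw [List.length_drop]; omega
        · rw [List.length_drop]; omega

-- ===== VERDICT (by name: the statement is the Claim_ definition above) =====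
theorem find_substrings_spec : Claim_equal_find_substrings := by
  intro s1 s2 _ hpre
  unfold Spec_find_substrings find_substrings find_substrings_alt
  exact go_eq s2.toList s1.toList.length s1.toList [] _ _ le_rfl hpre
    (Nat.lt_succ_self _) (Nat.lt_succ_self _)
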